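-- pv_equiv track=rewrite | github.com/cyzus/suzent | src/suzent/prompts.py | build_session_guidance_section
-- ===== SOURCE A (Python) =====
-- def build_session_guidance_section(session_guidance_items: list[str] | None) -> str:
--     if not session_guidance_items:
--         return ""
--
--     parts: list[str] = []
--     bullets: list[str] = []
--
--     for item in session_guidance_items:
--         if "\n" in item.strip():
--             # Multi-line block: flush pending bullets first, then render as-is
--             if bullets:
--                 parts.append("\n".join(f"- {b}" for b in bullets))
--                 bullets = []
--             parts.append(item.strip())
--         else:
--             bullets.append(item)
--
--     if bullets:
--         parts.append("\n".join(f"- {b}" for b in bullets))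
--
--     return "# Session Guidance\n" + "\n\n".join(parts)
-- ===== SOURCE B (Python) =====
-- def build_session_guidance_section(session_guidance_items):
--     if not session_guidance_items:
--         return ""
--     parts = []
--     i = 0
--     n = len(session_guidance_items)
--     while i < n:
--         is_block = "\n" in session_guidance_items[i].strip()
--         j = i
--         while j < n and ("\n" in session_guidance_items[j].strip()) == is_block:
--             j += 1
--         run = session_guidance_items[i:j]
--         if is_block:
--             parts.extend(it.strip() for it in run)
--         else:
--             parts.append("\n".join("- " + b for b in run))
--         i = j
--     return "# Session Guidance\n" + "\n\n".join(parts)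
-- ===== Notes on version B (the rewrite author's own statement) =====
-- stated objective: alternative
-- what changed: Replaced A's single pass with a mutable pending-bullets buffer (flushed before each multi-line block and after the loop) by a run-based scan: the list is split into maximal consecutive runs of same kind (multi-line vs single-line) and each run is rendered directly, with no flush state.
import Mathlib
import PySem

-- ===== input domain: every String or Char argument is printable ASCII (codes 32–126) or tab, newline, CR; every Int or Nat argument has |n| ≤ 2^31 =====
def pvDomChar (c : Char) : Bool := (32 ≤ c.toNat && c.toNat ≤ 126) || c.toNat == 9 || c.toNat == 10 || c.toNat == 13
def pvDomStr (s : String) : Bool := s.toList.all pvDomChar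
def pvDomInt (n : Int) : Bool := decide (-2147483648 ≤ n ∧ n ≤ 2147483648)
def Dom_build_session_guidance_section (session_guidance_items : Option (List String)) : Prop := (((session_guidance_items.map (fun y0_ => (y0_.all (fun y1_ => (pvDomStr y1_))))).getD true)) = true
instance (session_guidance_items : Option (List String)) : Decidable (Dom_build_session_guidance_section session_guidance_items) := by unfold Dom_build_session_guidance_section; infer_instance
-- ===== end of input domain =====

-- B renders the list run-by-run (maximal consecutive runs of the same kind) instead of
-- A's single pass with a pending-bullets buffer: same cost, different decomposition.

-- ===== PORT A =====
-- "\n".join(f"- {b}" for b in bullets)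
def bulletLinesA (bullets : List String) : String :=
  PySem.Str.join "\n" (bullets.map (fun b => "- " ++ b))

-- A's for-loop; state is (parts, bullets)
def loopA : List String → List String × List String → List String × List String
  | [], st => st
  | item :: rest, (parts, bullets) =>
    if PySem.Str.isIn "\n" (PySem.Str.strip item) then
      let parts := if bullets.isEmpty then parts else parts ++ [bulletLinesA bullets]
      loopA rest (parts ++ [PySem.Str.strip item], [])
    else
      loopA rest (parts, bullets ++ [item])

def build_session_guidance_section (session_guidance_items : Option (List String)) : String :=
  match session_guidance_items with
  | none => ""
  | some items =>
    if items.isEmpty then ""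
    else
      let st := loopA items ([], [])
      let parts := if st.2.isEmpty then st.1 else st.1 ++ [bulletLinesA st.2]
      "# Session Guidance\n" ++ PySem.Str.join "\n\n" parts

-- ===== PORT B =====
-- is_block = "\n" in item.strip()
def keyB (it : String) : Bool := PySem.Str.isIn "\n" (PySem.Str.strip it)

-- Source B's outer while loop: split off the maximal run with the head's kind, recurse on the rest
def runsB : List String → List (Bool × List String)
  | [] => []
  | x :: xs =>
    let k := keyB x
    (k, x :: xs.takeWhile (fun y => keyB y == k)) :: runsB (xs.dropWhile (fun y => keyB y == k))
termination_by l => l.length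
decreasing_by exact Nat.lt_succ_of_le (List.length_dropWhile_le _ _)

-- "\n".join("- " + b for b in run)
def bulletLinesB (run : List String) : String :=
  PySem.Str.join "\n" (run.map (fun b => "- " ++ b))

-- render each run: blocks one stripped part each, a bullet run one joined part
def renderRunsB (gs : List (Bool × List String)) : List String :=
  gs.flatMap (fun g => if g.1 then g.2.map (fun it => PySem.Str.strip it) else [bulletLinesB g.2])

def build_session_guidance_section_alt (session_guidance_items : Option (List String)) : String :=
  match session_guidance_items with
  | none => ""
  | some items =>
    if items.isEmpty then ""
    else
      "# Session Guidance\n" ++ PySem.Str.join "\n\n" (renderRunsB (runsB items))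

-- ===== PRECONDITION & SPEC =====
def Spec_build_session_guidance_section (session_guidance_items : Option (List String)) (out : String) : Prop := out = build_session_guidance_section_alt session_guidance_items
instance (session_guidance_items : Option (List String)) (out : String) : Decidable (Spec_build_session_guidance_section session_guidance_items out) := by unfold Spec_build_session_guidance_section; infer_instance

-- ===== CLAIM (what is proved, stated in full; the proofs are below) =====
def Claim_equal_build_session_guidance_section : Prop := ∀ (session_guidance_items : Option (List String)), Dom_build_session_guidance_section session_guidance_items → Spec_build_session_guidance_section session_guidance_items (build_session_guidance_section session_guidance_items)

-- ===== LEMMAS AND PROOFS =====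

-- A's post-loop flush, as a named helper for the proofs
def finishA (st : List String × List String) : List String :=
  if st.2.isEmpty then st.1 else st.1 ++ [bulletLinesA st.2]

-- consuming a run of single-line items only grows the bullet buffer
theorem loopA_bullet_run (run : List String) (h : ∀ y ∈ run, keyB y = false) :
    ∀ rest parts bullets,
      loopA (run ++ rest) (parts, bullets) = loopA rest (parts, bullets ++ run) := by
  induction run with
  | nil => intro rest parts bullets; simp
  | cons x xs ih =>
    intro rest parts bullets
    have hc : PySem.Str.isIn "\n" (PySem.Str.strip x) = false := h x (by simp)
    simp only [List.cons_append, loopA, hc, Bool.false_eq_true, if_false]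
    rw [ih (fun y hy => h y (by simp [hy]))]
    simp

-- consuming a run of multi-line items with an empty buffer appends their strips
theorem loopA_block_run (run : List String) (h : ∀ y ∈ run, keyB y = true) :
    ∀ rest parts,
      loopA (run ++ rest) (parts, []) = loopA rest (parts ++ run.map (fun it => PySem.Str.strip it), []) := by
  induction run with
  | nil => intro rest parts; simp
  | cons x xs ih =>
    intro rest parts
    have hc : PySem.Str.isIn "\n" (PySem.Str.strip x) = true := h x (by simp)
    simp only [List.cons_append, loopA, hc, if_true, List.isEmpty_nil]
    rw [ih (fun y hy => h y (by simp [hy]))]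
    simp

-- a nonempty buffer is flushed when the next item is a block
theorem loopA_flush (y : String) (hy : keyB y = true) (ys parts bullets : List String)
    (hb : bullets ≠ []) :
    loopA (y :: ys) (parts, bullets) =
      loopA (y :: ys) (parts ++ [bulletLinesA bullets], []) := by
  have hc : PySem.Str.isIn "\n" (PySem.Str.strip y) = true := hy
  have hbe : bullets.isEmpty = false := by simp [hb]
  have hc2 : PySem.Chars.isIn ['\n'] (PySem.Chars.strip y.toList) = true := by simpa using hc
  simp [loopA, hbe, hc2]

-- main invariant: A's loop from an empty buffer renders exactly B's runs
theorem loopA_runs (items : List String) :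
    ∀ parts, finishA (loopA items (parts, [])) = parts ++ renderRunsB (runsB items) := by
  match items with
  | [] => intro parts; rw [runsB]; simp [loopA, finishA, renderRunsB]
  | x :: xs =>
    intro parts
    rw [runsB.eq_def]
    simp only []
    set tw := xs.takeWhile (fun y => keyB y == keyB x) with htw
    set dw := xs.dropWhile (fun y => keyB y == keyB x) with hdw
    have hsplit : x :: xs = (x :: tw) ++ dw := by
      simp [htw, hdw, List.takeWhile_append_dropWhile]
    have hlen : dw.length < (x :: xs).length := by
      simpa using Nat.lt_succ_of_le (List.length_dropWhile_le _ _)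
    by_cases hk : keyB x = true
    · have hrun : ∀ y ∈ x :: tw, keyB y = true := by
        intro y hy
        rcases List.mem_cons.mp hy with h | h
        · subst h; exact hk
        · have := List.mem_takeWhile_imp h
          simp [hk] at this; exact this
      rw [hsplit, loopA_block_run _ hrun, loopA_runs dw]
      simp [renderRunsB, hk]
    · have hk' : keyB x = false := by simpa using hk
      have hrun : ∀ y ∈ x :: tw, keyB y = false := by
        intro y hy
        rcases List.mem_cons.mp hy with h | h
        · subst h; exact hk'
        · have := List.mem_takeWhile_imp h
          simp [hk'] at this; exact this
      rw [hsplit, loopA_bullet_run _ hrun]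
      simp only [List.nil_append]
      by_cases hdnil : dw = []
      · have hnil : runsB ([] : List String) = [] := by rw [runsB]
        rw [hdnil]
        simp [loopA, finishA, renderRunsB, hnil, hk', bulletLinesA, bulletLinesB]
      · obtain ⟨y, ys, hd⟩ := List.exists_cons_of_ne_nil hdnil
        have hne : xs.dropWhile (fun y => keyB y == keyB x) ≠ [] := by rw [← hdw]; exact hdnil
        have hdwe : List.dropWhile (fun y => keyB y == keyB x) xs = y :: ys := hdw.symm.trans hd
        have hky : keyB y = true := by
          have hnot := List.head_dropWhile_not (fun y => keyB y == keyB x) hne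
          simp only [hdwe, List.head_cons] at hnot
          simp [hk'] at hnot
          exact hnot
        rw [hd, loopA_flush y hky ys parts (x :: tw) (by simp), ← hd, loopA_runs dw]
        simp [renderRunsB, hk', bulletLinesA, bulletLinesB]
termination_by items.length
decreasing_by all_goals exact hlen

-- ===== VERDICT (by name: the statement is the Claim_ definition above) =====
theorem build_session_guidance_section_spec : Claim_equal_build_session_guidance_section := by
  intro o _
  unfold Spec_build_session_guidance_section
  match o with
  | none => rfl
  | some items =>
    simp only [build_session_guidance_section, build_session_guidance_section_alt]
    by_cases hi : items.isEmpty
    · simp [hi]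
    · simp only [hi, Bool.false_eq_true, if_false]
      have h := loopA_runs items []
      simp only [finishA, List.nil_append] at h
      rw [h]
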